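-- pv_equiv track=rewrite | github.com/QuickerStudio/Advanced-Distributed-Training-System | algorithm_library.py | analyze_user_behavior
-- ===== SOURCE A (Python) =====
-- def analyze_user_behavior(logs):
--     user_actions = {}
--
--     for log in logs:
--         user_id, action = log.split(',')
--         if user_id not in user_actions:
--             user_actions[user_id] = []
--         user_actions[user_id].append(action)
--
--     return user_actions
-- ===== SOURCE B (Python) =====
-- def analyze_user_behavior(logs):
--     # Parse once into (user_id, action) pairs, then build the result per key:
--     # first-occurrence-ordered distinct keys, each mapped to a filtered action list.
--     pairs = []
--     for log in logs:
--         user_id, action = log.split(',')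
--         pairs.append((user_id, action))
--     keys = list(dict.fromkeys(u for u, _ in pairs))
--     return {u: [a for v, a in pairs if v == u] for u in keys}
-- ===== Notes on version B (the rewrite author's own statement) =====
-- stated objective: alternative
-- what changed: Replaces the single-pass dict accumulation with a parse pass producing (user, action) pairs, an ordered key dedup, and a per-key filter pass building each action list.
import Mathlib
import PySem

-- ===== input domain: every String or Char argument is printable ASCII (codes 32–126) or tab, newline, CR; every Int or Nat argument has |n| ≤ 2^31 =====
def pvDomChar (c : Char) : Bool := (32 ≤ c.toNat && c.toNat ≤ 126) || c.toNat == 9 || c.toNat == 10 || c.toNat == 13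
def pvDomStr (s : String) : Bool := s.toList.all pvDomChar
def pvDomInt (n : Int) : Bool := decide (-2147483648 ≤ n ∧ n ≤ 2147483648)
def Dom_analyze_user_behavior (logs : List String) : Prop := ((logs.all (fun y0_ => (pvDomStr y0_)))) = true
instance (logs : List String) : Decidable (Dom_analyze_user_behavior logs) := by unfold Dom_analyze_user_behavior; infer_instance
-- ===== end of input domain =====

-- B replaces A's single-pass dict accumulation by parse-into-pairs + ordered key dedup + per-key filter pass (alternative decomposition, same results).


-- ===== PORT A =====
-- loop: user_actions = {}; for log: u,a = log.split(','); if u not in: [u]=[]; [u].append(a)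
def analyze_user_behavior (logs : List String) : List (String × List String) :=
  (logs.foldl (fun d log =>
      match PySem.Str.split? log "," with
      | some [user_id, action] =>
          let d' := if d.contains user_id then d else d.insert user_id ([] : List String)
          d'.modify user_id [] (fun l => l ++ [action])
      | _ => d) PySem.Dict.empty).items

-- ===== PORT B =====
-- parse each log into a (user_id, action) pair (malformed logs raise in Python: outside Pre_)
def pvParse? (log : String) : Option (String × String) :=
  let parts := (PySem.Str.split? log ",").getD []
  if parts.length = 2 then some (parts.getD 0 "", parts.getD 1 "") else none

def analyze_user_behavior_alt (logs : List String) : List (String × List String) :=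
  let pairs := logs.filterMap pvParse?
  (PySem.List.dedup (pairs.map Prod.fst)).map
    (fun u => (u, (pairs.filter (fun p => p.1 == u)).map Prod.snd))

-- ===== PRECONDITION & SPEC =====
-- Pre_ excludes exactly the logs without exactly one comma, on which A's log.split(',') unpacking raises ValueError.
def Pre_analyze_user_behavior (logs : List String) : Prop :=
  ∀ log ∈ logs, ((PySem.Str.split? log ",").getD []).length = 2
instance (logs : List String) : Decidable (Pre_analyze_user_behavior logs) := by
  unfold Pre_analyze_user_behavior; infer_instance

def pvWitness_analyze_user_behavior : List String := ["u1,login", "u2,view", "u1,logout"]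

def Spec_analyze_user_behavior (logs : List String) (out : List (String × List String)) : Prop := out = analyze_user_behavior_alt logs
instance (logs : List String) (out : List (String × List String)) : Decidable (Spec_analyze_user_behavior logs out) := by unfold Spec_analyze_user_behavior; infer_instance

-- ===== CLAIM (what is proved, stated in full; the proofs are below) =====
def Claim_equal_analyze_user_behavior : Prop := ∀ (logs : List String), Dom_analyze_user_behavior logs → Pre_analyze_user_behavior logs → Spec_analyze_user_behavior logs (analyze_user_behavior logs)

-- ===== LEMMAS AND PROOFS =====

-- A's loop body equals a single modify with default []
theorem pvStep_eq (d : PySem.Dict String (List String)) (u a : String) :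
    (let d' := if d.contains u then d else d.insert u ([] : List String)
     d'.modify u [] (fun l => l ++ [a])) = d.modify u [] (fun l => l ++ [a]) := by
  by_cases h : d.contains u = true
  · simp [h]
  · simp only [Bool.not_eq_true] at h
    simp [h, PySem.Dict.modify, PySem.Dict.getD_insert_self,
      PySem.Dict.insert_insert_self, PySem.Dict.getD_of_not_contains d ([] : List String) h]

-- the grouping fold over pairs, in items form
theorem pvFold_items (pairs : List (String × String)) :
    (pairs.foldl (fun d p => d.modify p.1 [] (fun l => l ++ [p.2])) PySem.Dict.empty).items
      = (PySem.List.dedup (pairs.map Prod.fst)).map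
          (fun u => (u, (pairs.filter (fun p => p.1 == u)).map Prod.snd)) := by
  rw [PySem.Dict.items_eq_map_keys _
      (PySem.Dict.nodup_keys_foldl_modify_key pairs Prod.fst []
        (fun _ p => fun l => l ++ [p.2]) PySem.Dict.empty (by simp [PySem.Dict.keys_empty]))
      ([] : List String)]
  rw [PySem.Dict.keys_foldl_modify_key pairs Prod.fst []
        (fun _ p => fun l => l ++ [p.2]) PySem.Dict.empty]
  simp [PySem.Dict.getD_foldl_modify_append, PySem.Set.update, PySem.Set.ofList_eq_foldl,
    PySem.Dict.keys_empty]

-- under Pre_, A's fold over logs is the pair fold over the parsed pairs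
theorem pvFold_parse (logs : List String) (h : ∀ log ∈ logs, ((PySem.Str.split? log ",").getD []).length = 2)
    (d : PySem.Dict String (List String)) :
    logs.foldl (fun d log =>
      match PySem.Str.split? log "," with
      | some [user_id, action] =>
          let d' := if d.contains user_id then d else d.insert user_id ([] : List String)
          d'.modify user_id [] (fun l => l ++ [action])
      | _ => d) d
    = (logs.filterMap pvParse?).foldl (fun d p => d.modify p.1 [] (fun l => l ++ [p.2])) d := by
  induction logs generalizing d with
  | nil => rfl
  | cons log rest ih =>
    have h2 := h log (List.mem_cons_self)
    simp only [List.foldl_cons, List.filterMap_cons]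
    cases hsp : PySem.Str.split? log "," with
    | none => rw [hsp] at h2; simp at h2
    | some xs =>
      rw [hsp] at h2
      match xs, h2 with
      | [u, a], _ =>
        simp only [pvParse?, hsp]
        rw [pvStep_eq]
        exact ih (fun l hl => h l (List.mem_cons_of_mem _ hl)) _

-- ===== VERDICT (by name: the statement is the Claim_ definition above) =====
theorem analyze_user_behavior_spec : Claim_equal_analyze_user_behavior := by
  intro logs _ hpre
  unfold Spec_analyze_user_behavior analyze_user_behavior analyze_user_behavior_alt
  rw [pvFold_parse logs hpre, pvFold_items]
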